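-- pv_equiv track=rewrite | github.com/CapricornRay/my-anime-list | localize_covers.py | build_download_jobs
-- ===== SOURCE A (Python) =====
-- def is_remote_url(value):
--     return isinstance(value, str) and value.startswith(("http://", "https://"))
--
-- def build_download_jobs(data, limit):
--     jobs = []
--     seen_ids = set()
--
--     for year_group in data:
--         for anime in year_group.get("animes", []):
--             anime_id = anime.get("id")
--             cover = anime.get("cover")
--             if anime_id in seen_ids:
--                 continue
--             seen_ids.add(anime_id)
--             if not is_remote_url(cover):
--                 continue
--             jobs.append({
--                 "id": anime_id,
--                 "cover": cover,
--             })
--             if limit and len(jobs) >= limit: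
--                 return jobs
--
--     return jobs
-- ===== SOURCE B (Python) =====
-- def is_remote_url(value):
--     return isinstance(value, str) and value.startswith(("http://", "https://"))
--
-- def build_download_jobs(data, limit):
--     # Pass 1: ordered first-occurrence map anime_id -> first-seen cover (no early exit).
--     first_cover = {}
--     for year_group in data:
--         for anime in year_group.get("animes", []):
--             first_cover.setdefault(anime.get("id"), anime.get("cover"))
--     # Pass 2: emit download jobs for remote covers, honouring the limit guard.
--     jobs = []
--     for anime_id, cover in first_cover.items():
--         if is_remote_url(cover):
--             jobs.append({"id": anime_id, "cover": cover})
--             if limit and len(jobs) >= limit: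
--                 return jobs
--     return jobs
-- ===== Notes on version B (the rewrite author's own statement) =====
-- stated objective: alternative
-- what changed: A interleaves dedup, remote-url filtering and the limit early-exit in one nested scan with a seen-set; B decomposes it into two passes: first build an ordered first-occurrence map id->cover over all data with setdefault, then emit jobs from that map's items with the same limit guard.
import Mathlib
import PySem

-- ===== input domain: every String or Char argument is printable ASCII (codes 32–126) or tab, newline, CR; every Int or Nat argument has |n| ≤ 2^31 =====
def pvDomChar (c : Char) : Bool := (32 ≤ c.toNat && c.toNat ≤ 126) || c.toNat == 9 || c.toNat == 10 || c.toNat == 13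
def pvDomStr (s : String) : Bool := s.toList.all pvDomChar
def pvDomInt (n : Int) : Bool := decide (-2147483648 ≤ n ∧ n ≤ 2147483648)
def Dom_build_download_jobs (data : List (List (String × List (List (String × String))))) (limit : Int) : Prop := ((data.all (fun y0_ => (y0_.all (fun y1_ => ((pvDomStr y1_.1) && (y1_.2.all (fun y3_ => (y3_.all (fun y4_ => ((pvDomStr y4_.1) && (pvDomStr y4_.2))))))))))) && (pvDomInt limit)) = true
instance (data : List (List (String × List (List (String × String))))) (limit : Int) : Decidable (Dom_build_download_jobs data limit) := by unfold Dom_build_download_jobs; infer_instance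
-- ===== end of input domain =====

-- B restructures A's single nested scan (dedup + filter + limit interleaved) into two passes:
-- an ordered first-occurrence map built with setdefault, then a scan of its items with the same
-- limit guard; equal return values (no observable mutation in either program).

-- ===== shared small helpers (used verbatim by both Pythons: is_remote_url and the .get lookups) =====

-- is_remote_url on a present string value
def isRemoteStr (s : String) : Bool :=
  PySem.Str.startswith s "http://" || PySem.Str.startswith s "https://"

-- is_remote_url applied to anime.get("cover") (None is not a str → False)
def isRemoteOpt (v : Option String) : Bool :=
  match v with
  | some s => isRemoteStr s
  | none => false

-- the job dict {"id": ..., "cover": ...}; an absent "id" (Python None) is excluded by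
-- Pre_build_download_jobs since None is not a String — "" stands in outside Pre_
def jobOf (i : Option String) (c : Option String) : List (String × String) :=
  [("id", i.getD ""), ("cover", c.getD "")]

-- year_group.get("animes", [])
def animesOf (g : List (String × List (List (String × String)))) : List (List (String × String)) :=
  (PySem.Dict.ofList g).getD "animes" []

-- anime.get("id")
def idOf (anime : List (String × String)) : Option String :=
  (PySem.Dict.ofList anime).get? "id"

-- anime.get("cover")
def coverOf (anime : List (String × String)) : Option String :=
  (PySem.Dict.ofList anime).get? "cover"

-- ===== PORT A =====

-- inner 'for anime in year_group.get("animes", [])' loop; Sum.inl = the early 'return jobs'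
def aAnimeLoop (animes : List (List (String × String)))
    (jobs : List (List (String × String))) (seen : PySem.Set (Option String)) (limit : Int) :
    Sum (List (List (String × String))) (List (List (String × String)) × PySem.Set (Option String)) :=
  match animes with
  | [] => Sum.inr (jobs, seen)
  | anime :: rest =>
    let animeId := idOf anime
    let cover := coverOf anime
    if PySem.Set.contains seen animeId then aAnimeLoop rest jobs seen limit
    else
      let seen' := PySem.Set.add seen animeId
      if isRemoteOpt cover = false then aAnimeLoop rest jobs seen' limit
      else
        let jobs' := jobs ++ [jobOf animeId cover]
        if limit ≠ 0 ∧ limit ≤ (jobs'.length : Int) then Sum.inl jobs'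
        else aAnimeLoop rest jobs' seen' limit

-- outer 'for year_group in data' loop
def aGroupLoop (groups : List (List (String × List (List (String × String)))))
    (jobs : List (List (String × String))) (seen : PySem.Set (Option String)) (limit : Int) :
    List (List (String × String)) :=
  match groups with
  | [] => jobs
  | g :: rest =>
    match aAnimeLoop (animesOf g) jobs seen limit with
    | Sum.inl j => j
    | Sum.inr (j, s) => aGroupLoop rest j s limit

def build_download_jobs (data : List (List (String × List (List (String × String))))) (limit : Int) : List (List (String × String)) :=
  aGroupLoop data [] PySem.Set.empty limit

-- ===== PORT B =====

-- pass 1: first_cover.setdefault(anime.get("id"), anime.get("cover")) over every anime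
def bFirstCover (data : List (List (String × List (List (String × String))))) :
    PySem.Dict (Option String) (Option String) :=
  data.foldl
    (fun d g => (animesOf g).foldl (fun d anime => d.setdefault (idOf anime) (coverOf anime)) d)
    PySem.Dict.empty

-- pass 2: 'for anime_id, cover in first_cover.items()' with the same limit guard
def bScan (items : List (Option String × Option String))
    (jobs : List (List (String × String))) (limit : Int) : List (List (String × String)) :=
  match items with
  | [] => jobs
  | (i, c) :: rest =>
    if isRemoteOpt c then
      let jobs' := jobs ++ [jobOf i c]
      if limit ≠ 0 ∧ limit ≤ (jobs'.length : Int) then jobs'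
      else bScan rest jobs' limit
    else bScan rest jobs limit

def build_download_jobs_alt (data : List (List (String × List (List (String × String))))) (limit : Int) : List (List (String × String)) :=
  bScan (bFirstCover data).items [] limit

-- ===== PRECONDITION & SPEC =====
-- Pre_ excludes inputs where some anime has a remote "cover" but no "id" key: there Python A
-- returns {"id": None, ...}, which is not a value of the declared dict[str, str] type
-- (B returns the same untypeable value).
def Pre_build_download_jobs (data : List (List (String × List (List (String × String))))) (limit : Int) : Prop :=
  ∀ g ∈ data, ∀ anime ∈ animesOf g,
    isRemoteOpt (coverOf anime) = true → (PySem.Dict.ofList anime).contains "id" = true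

instance (data : List (List (String × List (List (String × String))))) (limit : Int) : Decidable (Pre_build_download_jobs data limit) := by
  unfold Pre_build_download_jobs; infer_instance

def pvWitness_build_download_jobs : (List (List (String × List (List (String × String))))) × Int :=
  ([[("animes", [[("id", "1"), ("cover", "http://x")], [("id", "2"), ("cover", "nope")]])]], 0)

def Spec_build_download_jobs (data : List (List (String × List (List (String × String))))) (limit : Int) (out : List (List (String × String))) : Prop := out = build_download_jobs_alt data limit
instance (data : List (List (String × List (List (String × String))))) (limit : Int) (out : List (List (String × String))) : Decidable (Spec_build_download_jobs data limit out) := by unfold Spec_build_download_jobs; infer_instance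

-- ===== CLAIM (what is proved, stated in full; the proofs are below) =====
def Claim_equal_build_download_jobs : Prop := ∀ (data : List (List (String × List (List (String × String))))) (limit : Int), Dom_build_download_jobs data limit → Pre_build_download_jobs data limit → Spec_build_download_jobs data limit (build_download_jobs data limit)

-- ===== LEMMAS AND PROOFS =====

-- the (id, cover) pair a given anime contributes
def keyOf (anime : List (String × String)) : Option String × Option String :=
  (idOf anime, coverOf anime)

-- all (id, cover) pairs of the whole input, in traversal order
def entriesOf (data : List (List (String × List (List (String × String))))) :
    List (Option String × Option String) :=
  (data.flatMap animesOf).map keyOf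

-- A's loop re-expressed over the flat entry list
def aLoop (es : List (Option String × Option String))
    (jobs : List (List (String × String))) (seen : PySem.Set (Option String)) (limit : Int) :
    Sum (List (List (String × String))) (List (List (String × String)) × PySem.Set (Option String)) :=
  match es with
  | [] => Sum.inr (jobs, seen)
  | (i, c) :: rest =>
    if PySem.Set.contains seen i then aLoop rest jobs seen limit
    else
      let seen' := PySem.Set.add seen i
      if isRemoteOpt c = false then aLoop rest jobs seen' limit
      else
        let jobs' := jobs ++ [jobOf i c]
        if limit ≠ 0 ∧ limit ≤ (jobs'.length : Int) then Sum.inl jobs'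
        else aLoop rest jobs' seen' limit

-- first-occurrence entries whose ids are not in `seen`
def freshEntries (seen : List (Option String)) (es : List (Option String × Option String)) :
    List (Option String × Option String) :=
  match es with
  | [] => []
  | (i, c) :: rest =>
    if i ∈ seen then freshEntries seen rest else (i, c) :: freshEntries (i :: seen) rest

theorem aAnimeLoop_eq_aLoop (animes : List (List (String × String)))
    (jobs : List (List (String × String))) (seen : PySem.Set (Option String)) (limit : Int) :
    aAnimeLoop animes jobs seen limit = aLoop (animes.map keyOf) jobs seen limit := by
  induction animes generalizing jobs seen with
  | nil => rfl
  | cons a rest ih =>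
    simp only [aAnimeLoop, aLoop, List.map_cons, keyOf]
    split_ifs with h1 h2 h3 <;> simp [ih]

theorem aLoop_append (xs ys : List (Option String × Option String))
    (jobs : List (List (String × String))) (seen : PySem.Set (Option String)) (limit : Int) :
    aLoop (xs ++ ys) jobs seen limit =
      match aLoop xs jobs seen limit with
      | Sum.inl j => Sum.inl j
      | Sum.inr (j, s) => aLoop ys j s limit := by
  induction xs generalizing jobs seen with
  | nil => rfl
  | cons p rest ih =>
    obtain ⟨i, c⟩ := p
    simp only [List.cons_append, aLoop]
    split_ifs with h1 h2 h3 <;> simp [ih]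

theorem aGroupLoop_eq_aLoop (groups : List (List (String × List (List (String × String)))))
    (jobs : List (List (String × String))) (seen : PySem.Set (Option String)) (limit : Int) :
    aGroupLoop groups jobs seen limit =
      (match aLoop (entriesOf groups) jobs seen limit with
       | Sum.inl j => j
       | Sum.inr (j, _) => j) := by
  induction groups generalizing jobs seen with
  | nil => rfl
  | cons g rest ih =>
    simp only [aGroupLoop, entriesOf, List.flatMap_cons, List.map_append]
    rw [aLoop_append, aAnimeLoop_eq_aLoop]
    cases h : aLoop ((animesOf g).map keyOf) jobs seen limit with
    | inl j => rfl
    | inr p => obtain ⟨j, s⟩ := p; simpa [entriesOf] using ih j s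

theorem freshEntries_congr (s t : List (Option String))
    (h : ∀ x, x ∈ s ↔ x ∈ t) (es : List (Option String × Option String)) :
    freshEntries s es = freshEntries t es := by
  induction es generalizing s t with
  | nil => rfl
  | cons p rest ih =>
    obtain ⟨i, c⟩ := p
    simp only [freshEntries]
    by_cases hi : i ∈ s
    · rw [if_pos hi, if_pos ((h i).mp hi), ih s t h]
    · rw [if_neg hi, if_neg (fun ht => hi ((h i).mpr ht))]
      refine congrArg _ (ih _ _ ?_)
      intro x; simp [h x]

-- A's run (with the early return unwrapped) is B's second pass over the fresh first-occurrence entries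
theorem aLoop_eq_bScan (es : List (Option String × Option String))
    (jobs : List (List (String × String))) (seen : PySem.Set (Option String)) (limit : Int) :
    (match aLoop es jobs seen limit with
     | Sum.inl j => j
     | Sum.inr (j, _) => j) = bScan (freshEntries seen es) jobs limit := by
  induction es generalizing jobs seen with
  | nil => rfl
  | cons p rest ih =>
    obtain ⟨i, c⟩ := p
    simp only [aLoop, freshEntries]
    by_cases hm : i ∈ seen
    · have hc : PySem.Set.contains seen i = true := by
        simpa [PySem.Set.contains] using hm
      rw [if_pos hc, if_pos hm, ih]
    · have hc : PySem.Set.contains seen i = false := by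
        simpa [PySem.Set.contains] using hm
      have hadd : PySem.Set.add seen i = seen ++ [i] := by
        simp [PySem.Set.add, PySem.Set.contains, hm]
      have hcongr : freshEntries (seen ++ [i]) rest = freshEntries (i :: seen) rest :=
        freshEntries_congr _ _ (by intro x; simp [or_comm]) rest
      rw [if_neg (by simpa [PySem.Set.contains] using hm), if_neg hm, hadd]
      simp only [bScan]
      by_cases hr : isRemoteOpt c = true
      · rw [if_neg (by simp [hr]), if_pos hr]
        by_cases hl : limit ≠ 0 ∧ limit ≤ ((jobs ++ [jobOf i c]).length : Int)
        · rw [if_pos hl, if_pos hl]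
        · rw [if_neg hl, if_neg hl, ih, hcongr]
      · have hr' : isRemoteOpt c = false := by simpa using hr
        rw [if_pos hr', if_neg (by simp [hr']), ih, hcongr]

theorem setdefault_fold_items (es : List (Option String × Option String))
    (d : PySem.Dict (Option String) (Option String)) (hnd : d.keys.Nodup) :
    (es.foldl (fun d p => d.setdefault p.1 p.2) d).items = d.items ++ freshEntries d.keys es := by
  induction es generalizing d with
  | nil => simp [freshEntries]
  | cons p rest ih =>
    obtain ⟨i, c⟩ := p
    simp only [List.foldl_cons, freshEntries]
    by_cases hk : d.contains i = true
    · rw [PySem.Dict.setdefault_of_contains d c hk,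
        if_pos ((PySem.Dict.contains_iff_mem_keys d i).mp hk), ih d hnd]
    · have hk' : d.contains i = false := by simpa using hk
      have hmem : i ∉ d.keys := fun h => hk ((PySem.Dict.contains_iff_mem_keys d i).mpr h)
      rw [PySem.Dict.setdefault_of_not_contains d c hk', if_neg hmem,
        ih _ (PySem.Dict.nodup_keys_insert d i c hnd),
        PySem.Dict.items_insert_of_not_contains d c hk',
        PySem.Dict.keys_insert_of_not_contains d c hk',
        freshEntries_congr (d.keys ++ [i]) (i :: d.keys) (by intro x; simp [or_comm]) rest,
        List.append_assoc]
      simp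

theorem bFirstCover_items (data : List (List (String × List (List (String × String))))) :
    (bFirstCover data).items = freshEntries [] (entriesOf data) := by
  have h : bFirstCover data =
      (entriesOf data).foldl (fun d p => d.setdefault p.1 p.2) PySem.Dict.empty := by
    unfold bFirstCover entriesOf keyOf
    rw [List.foldl_map, List.foldl_flatMap]
  rw [h, setdefault_fold_items _ _ PySem.Dict.nodup_keys_empty]
  rfl

-- ===== VERDICT (by name: the statement is the Claim_ definition above) =====
theorem build_download_jobs_spec : Claim_equal_build_download_jobs := by
  intro data limit _ _
  unfold Spec_build_download_jobs build_download_jobs build_download_jobs_alt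
  rw [aGroupLoop_eq_aLoop, bFirstCover_items, aLoop_eq_bScan]
  rfl
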